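-- pv_equiv track=rewrite | github.com/xtpclark/pg_healthcheck2 | trends_app/ai_connector.py | pick_best_model
-- ===== SOURCE A (Python) =====
-- def pick_best_model(model_names, provider_type):
--     """Pick the best model from available options based on provider type."""
--     if not model_names:
--         return None
--
--     # Provider-specific preferences
--     preferences = {
--         'google_gemini': ['1.5-flash', 'flash', '1.5-pro', 'pro'],
--         'openai': ['gpt-4o', 'gpt-4', 'gpt-3.5'],
--         'anthropic': ['sonnet', 'opus', 'haiku'],
--         'xai': ['grok-beta'],
--         'deepseek': ['deepseek-chat'],
--         'together': ['llama', 'mistral'],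
--         'openrouter': ['gpt-4o', 'claude'],
--     }
--
--     provider_prefs = preferences.get(provider_type, [])
--
--     # Try to find preferred model
--     for pref in provider_prefs:
--         for name in model_names:
--             if pref.lower() in name.lower():
--                 return name
--
--     # Fall back to first available
--     return model_names[0]
-- ===== SOURCE B (Python) =====
-- def pick_best_model(model_names, provider_type):
--     """Pick the best model from available options based on provider type."""
--     if not model_names:
--         return None
--
--     preferences = {
--         'google_gemini': ['1.5-flash', 'flash', '1.5-pro', 'pro'],
--         'openai': ['gpt-4o', 'gpt-4', 'gpt-3.5'],
--         'anthropic': ['sonnet', 'opus', 'haiku'],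
--         'xai': ['grok-beta'],
--         'deepseek': ['deepseek-chat'],
--         'together': ['llama', 'mistral'],
--         'openrouter': ['gpt-4o', 'claude'],
--     }
--
--     provider_prefs = preferences.get(provider_type, [])
--
--     def rank(name):
--         low = name.lower()
--         for i, pref in enumerate(provider_prefs):
--             if pref.lower() in low:
--                 return i
--         return len(provider_prefs)
--
--     # min's first-minimum tie-break = first name matching the highest-priority
--     # preference; if nothing matches, all ranks are equal and min returns model_names[0].
--     return min(model_names, key=rank)
-- ===== Notes on version B (the rewrite author's own statement) =====
-- stated objective: idiomatic
-- what changed: Replaces the nested pref-outer/name-inner scan and explicit fallback with a single min(model_names, key=rank), where rank(name) is the index of the first matching preference (len(prefs) if none); min's first-minimum tie-break reproduces A's priority order and the fallback to model_names[0].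
import Mathlib
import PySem

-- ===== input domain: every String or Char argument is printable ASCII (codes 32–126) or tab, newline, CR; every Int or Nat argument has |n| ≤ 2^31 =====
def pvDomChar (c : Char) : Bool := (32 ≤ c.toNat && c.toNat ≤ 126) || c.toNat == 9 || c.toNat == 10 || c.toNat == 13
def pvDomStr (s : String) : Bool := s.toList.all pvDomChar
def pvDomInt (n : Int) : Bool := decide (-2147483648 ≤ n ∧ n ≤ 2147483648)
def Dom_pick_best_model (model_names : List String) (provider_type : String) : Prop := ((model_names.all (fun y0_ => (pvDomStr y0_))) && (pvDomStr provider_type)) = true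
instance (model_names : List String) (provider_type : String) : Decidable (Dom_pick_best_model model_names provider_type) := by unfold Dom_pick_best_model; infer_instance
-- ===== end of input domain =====

-- B replaces A's nested preference-then-name scan by a single `min` over the names with a
-- preference-rank key (objective: idiomatic; same asymptotic cost).

-- shared constant data: the `preferences` dict literal, identical in both Pythons
def pbmPreferences : PySem.Dict String (List String) :=
  PySem.Dict.ofList
    [ ("google_gemini", ["1.5-flash", "flash", "1.5-pro", "pro"]),
      ("openai", ["gpt-4o", "gpt-4", "gpt-3.5"]),
      ("anthropic", ["sonnet", "opus", "haiku"]),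
      ("xai", ["grok-beta"]),
      ("deepseek", ["deepseek-chat"]),
      ("together", ["llama", "mistral"]),
      ("openrouter", ["gpt-4o", "claude"]) ]

-- ===== PORT A =====
-- inner `for name in model_names` loop of A
def pbmFindName (pref : String) (names : List String) : Option String :=
  match names with
  | [] => none
  | n :: t =>
    if PySem.Str.isIn (PySem.Str.lower pref) (PySem.Str.lower n) then some n
    else pbmFindName pref t

-- outer `for pref in provider_prefs` loop of A
def pbmLoop (prefs : List String) (names : List String) : Option String :=
  match prefs with
  | [] => none
  | p :: ps =>
    match pbmFindName p names with
    | some n => some n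
    | none => pbmLoop ps names

def pick_best_model (model_names : List String) (provider_type : String) : Option String :=
  match model_names with
  | [] => none
  | n0 :: _ =>
    match pbmLoop (PySem.Dict.getD pbmPreferences provider_type []) model_names with
    | some n => some n
    | none => some n0      -- fall back to first available

-- ===== PORT B =====
-- Source B's rank(name): index of the first preference substring contained in name.lower(), else len(prefs)
def pbmRank (prefs : List String) (low : String) : Nat :=
  match prefs with
  | [] => 0
  | p :: ps =>
    if PySem.Str.isIn (PySem.Str.lower p) low then 0
    else 1 + pbmRank ps low

def pick_best_model_alt (model_names : List String) (provider_type : String) : Option String :=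
  match model_names with
  | [] => none
  | _ :: _ =>
    PySem.List.min? model_names
      (fun name => pbmRank (PySem.Dict.getD pbmPreferences provider_type []) (PySem.Str.lower name))

-- ===== PRECONDITION & SPEC =====
def Spec_pick_best_model (model_names : List String) (provider_type : String) (out : Option String) : Prop := out = pick_best_model_alt model_names provider_type
instance (model_names : List String) (provider_type : String) (out : Option String) : Decidable (Spec_pick_best_model model_names provider_type out) := by unfold Spec_pick_best_model; infer_instance

-- ===== CLAIM (what is proved, stated in full; the proofs are below) =====
def Claim_equal_pick_best_model : Prop := ∀ (model_names : List String) (provider_type : String), Dom_pick_best_model model_names provider_type → Spec_pick_best_model model_names provider_type (pick_best_model model_names provider_type)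

-- ===== LEMMAS AND PROOFS =====

-- the foldl step used by PySem.List.min?
def pbmStep (k : String → Nat) : Option String → String → Option String :=
  fun acc x =>
    match acc with
    | none => some x
    | some m => if k x < k m then some x else some m

lemma pbm_min?_eq_foldl (xs : List String) (k : String → Nat) :
    PySem.List.min? xs k = xs.foldl (pbmStep k) none := by
  unfold PySem.List.min?
  congr 1
  funext acc x
  cases acc <;> rfl

-- once the accumulator holds an element of key 0 it never changes
lemma pbm_foldl_absorb (k : String → Nat) (xs : List String) (m : String) (hm : k m = 0) :
    xs.foldl (pbmStep k) (some m) = some m := by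
  induction xs with
  | nil => rfl
  | cons x t ih =>
    simp only [List.foldl_cons, pbmStep, hm, Nat.not_lt_zero, if_false]
    exact ih

-- over a block of positive-key elements the accumulator stays positive-key (or none)
lemma pbm_foldl_pos (k : String → Nat) (xs : List String)
    (hxs : ∀ x ∈ xs, 0 < k x) :
    ∀ acc : Option String, (acc = none ∨ ∃ m, acc = some m ∧ 0 < k m) →
      (xs.foldl (pbmStep k) acc = none ∨ ∃ m, xs.foldl (pbmStep k) acc = some m ∧ 0 < k m) := by
  induction xs with
  | nil => intro acc h; simpa using h
  | cons x t ih =>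
    intro acc h
    have hx : 0 < k x := hxs x (by simp)
    have ht : ∀ y ∈ t, 0 < k y := fun y hy => hxs y (by simp [hy])
    rcases h with h | ⟨m, hm, hmpos⟩
    · subst h
      exact ih ht (some x) (Or.inr ⟨x, rfl, hx⟩)
    · subst hm
      simp only [List.foldl_cons, pbmStep]
      split
      · exact ih ht (some x) (Or.inr ⟨x, rfl, hx⟩)
      · exact ih ht (some m) (Or.inr ⟨m, rfl, hmpos⟩)

-- shifting every key (of the elements and of the accumulator) by 1 does not change the fold
lemma pbm_foldl_shift (k1 k2 : String → Nat) (xs : List String)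
    (hxs : ∀ x ∈ xs, k1 x = 1 + k2 x) :
    ∀ acc : Option String, (∀ m, acc = some m → k1 m = 1 + k2 m) →
      xs.foldl (pbmStep k1) acc = xs.foldl (pbmStep k2) acc := by
  induction xs with
  | nil => intro acc _; rfl
  | cons x t ih =>
    intro acc hacc
    have hx : k1 x = 1 + k2 x := hxs x (by simp)
    have ht : ∀ y ∈ t, k1 y = 1 + k2 y := fun y hy => hxs y (by simp [hy])
    cases acc with
    | none =>
      simp only [List.foldl_cons, pbmStep]
      exact ih ht (some x) (by intro m hm; cases hm; exact hx)
    | some m =>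
      have hm : k1 m = 1 + k2 m := hacc m rfl
      simp only [List.foldl_cons, pbmStep, hx, hm, Nat.add_lt_add_iff_left]
      split
      · exact ih ht (some x) (by intro m' hm'; cases hm'; exact hx)
      · exact ih ht (some m) (by intro m' hm'; cases hm'; exact hm)

-- characterisation of A's inner loop: a successful find splits the list
lemma pbmFindName_some (pref : String) (names : List String) (n : String)
    (h : pbmFindName pref names = some n) :
    ∃ pre suf, names = pre ++ n :: suf ∧
      (∀ x ∈ pre, PySem.Str.isIn (PySem.Str.lower pref) (PySem.Str.lower x) = false) ∧
      PySem.Str.isIn (PySem.Str.lower pref) (PySem.Str.lower n) = true := by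
  induction names with
  | nil => exact absurd h (by simp [pbmFindName])
  | cons x t ih =>
    simp only [pbmFindName] at h
    by_cases hx : PySem.Str.isIn (PySem.Str.lower pref) (PySem.Str.lower x) = true
    · rw [if_pos hx] at h
      obtain rfl : x = n := by injection h
      exact ⟨[], t, rfl, by simp, hx⟩
    · rw [if_neg hx] at h
      obtain ⟨pre, suf, hsplit, hpre, hn⟩ := ih h
      refine ⟨x :: pre, suf, by simp [hsplit], ?_, hn⟩
      intro y hy
      rcases List.mem_cons.mp hy with rfl | hy
      · exact Bool.not_eq_true _ ▸ (by simpa using hx)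
      · exact hpre y hy

lemma pbmFindName_none (pref : String) (names : List String)
    (h : pbmFindName pref names = none) :
    ∀ x ∈ names, PySem.Str.isIn (PySem.Str.lower pref) (PySem.Str.lower x) = false := by
  induction names with
  | nil => intro x hx; simp at hx
  | cons y t ih =>
    intro x hx
    simp only [pbmFindName] at h
    by_cases hy : PySem.Str.isIn (PySem.Str.lower pref) (PySem.Str.lower y) = true
    · rw [if_pos hy] at h; exact absurd h (by simp)
    · rw [if_neg hy] at h
      rcases List.mem_cons.mp hx with rfl | hx
      · simpa using hy
      · exact ih h x hx

-- main lemma: A's nested loops (with fallback) compute B's rank-argmin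
lemma pbm_main (prefs : List String) (n0 : String) (t : List String) :
    (match pbmLoop prefs (n0 :: t) with
     | some n => some n
     | none => some n0) =
    PySem.List.min? (n0 :: t) (fun x => pbmRank prefs (PySem.Str.lower x)) := by
  induction prefs generalizing n0 t with
  | nil =>
    rw [pbm_min?_eq_foldl]
    simp only [pbmLoop, List.foldl_cons, pbmStep]
    rw [pbm_foldl_absorb (fun x => pbmRank [] (PySem.Str.lower x)) t n0 rfl]
  | cons p ps ih =>
    rcases hfind : pbmFindName p (n0 :: t) with _ | n
    · -- no name contains p: every rank is 1 + rank ps, fold shifts away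
      have hall := pbmFindName_none p (n0 :: t) hfind
      have hkey : ∀ x ∈ n0 :: t,
          pbmRank (p :: ps) (PySem.Str.lower x) = 1 + pbmRank ps (PySem.Str.lower x) := by
        intro x hx
        simp only [pbmRank, hall x hx, Bool.false_eq_true, if_false]
      rw [pbm_min?_eq_foldl,
          pbm_foldl_shift (fun x => pbmRank (p :: ps) (PySem.Str.lower x))
            (fun x => pbmRank ps (PySem.Str.lower x)) (n0 :: t) hkey none
            (by intro m hm; cases hm),
          ← pbm_min?_eq_foldl]
      simp only [pbmLoop, hfind]
      exact ih n0 t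
    · -- some name contains p: the first such name has rank 0, everything before it rank > 0
      obtain ⟨pre, suf, hsplit, hpre, hn⟩ := pbmFindName_some p (n0 :: t) n hfind
      have hkn : pbmRank (p :: ps) (PySem.Str.lower n) = 0 := by
        simp only [pbmRank, hn, if_true]
      have hkpre : ∀ x ∈ pre, 0 < pbmRank (p :: ps) (PySem.Str.lower x) := by
        intro x hx
        simp only [pbmRank, hpre x hx, Bool.false_eq_true, if_false]
        omega
      simp only [pbmLoop, hfind]
      rw [pbm_min?_eq_foldl, hsplit, List.foldl_append]
      have hmid := pbm_foldl_pos (fun x => pbmRank (p :: ps) (PySem.Str.lower x)) pre hkpre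
        none (Or.inl rfl)
      rcases hmid with hmid | ⟨m, hmid, hmpos⟩
      · rw [hmid]
        simp only [List.foldl_cons, pbmStep]
        rw [pbm_foldl_absorb (fun x => pbmRank (p :: ps) (PySem.Str.lower x)) suf n hkn]
      · rw [hmid]
        simp only [List.foldl_cons, pbmStep, hkn]
        rw [if_pos hmpos,
            pbm_foldl_absorb (fun x => pbmRank (p :: ps) (PySem.Str.lower x)) suf n hkn]

-- ===== VERDICT (by name: the statement is the Claim_ definition above) =====
theorem pick_best_model_spec : Claim_equal_pick_best_model := by
  intro model_names provider_type _
  unfold Spec_pick_best_model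
  cases model_names with
  | nil => rfl
  | cons n0 t =>
    simpa [pick_best_model, pick_best_model_alt] using
      pbm_main (PySem.Dict.getD pbmPreferences provider_type []) n0 t
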